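-- pv_equiv track=rewrite | github.com/agavrel/ls_python | ls.py | my_cmp
-- ===== SOURCE A (Python) =====
-- def my_cmp(a, b):
--     a = a.lower().replace(".", "").replace('_', '') # ls ignores the dots and dashes when it sorts filenames
--     b = b.lower().replace(".", "").replace('_', '')
--     if len(b) < len(a):
--         return -my_cmp(b, a)  # make sure 'a' is the shortest string to avoid buffer overflow
--     for i in range(len(a)):
--         if a[i] != b[i]:
--             return ord(a[i]) - ord(b[i]) # returns difference in char values
--     return -1 # ls returns the longest first if 'a' is a substring of 'b'
-- ===== SOURCE B (Python) =====
-- def my_cmp(a, b):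
--     na = a.lower().replace(".", "").replace('_', '')
--     nb = b.lower().replace(".", "").replace('_', '')
--     for x, y in zip(na, nb):
--         if x != y:
--             return ord(x) - ord(y)
--     return -1 if len(na) <= len(nb) else 1
-- ===== Notes on version B (the rewrite author's own statement) =====
-- stated objective: simpler
-- what changed: Replaces the recursive length-swap (-my_cmp(b,a)) and index loop with a single zip scan over both normalized strings plus a length-based tiebreak (-1 if len(na)<=len(nb) else 1).
import Mathlib
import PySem

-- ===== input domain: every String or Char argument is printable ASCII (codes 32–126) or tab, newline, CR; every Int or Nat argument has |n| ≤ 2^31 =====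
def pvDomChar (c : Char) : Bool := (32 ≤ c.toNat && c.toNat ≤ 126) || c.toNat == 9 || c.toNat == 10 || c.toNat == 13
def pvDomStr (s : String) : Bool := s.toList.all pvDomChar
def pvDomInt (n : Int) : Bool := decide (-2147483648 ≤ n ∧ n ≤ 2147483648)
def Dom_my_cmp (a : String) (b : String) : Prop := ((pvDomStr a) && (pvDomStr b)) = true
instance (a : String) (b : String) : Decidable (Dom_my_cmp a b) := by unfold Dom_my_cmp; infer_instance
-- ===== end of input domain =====

-- B replaces A's recursive length-swap with one zip scan plus a length tiebreak; objective: simpler.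

-- ===== PORT A =====
-- s.lower().replace(".", "").replace('_', '')   (shared by both Python versions line for line)
def pvNorm (s : String) : List Char :=
  (PySem.Str.replace (PySem.Str.replace (PySem.Str.lower s) "." "") "_" "").toList

-- 'for i in range(len(a)): if a[i] != b[i]: return ord(a[i]) - ord(b[i])' then 'return -1'.
-- la.getD i ' ' is exact here: the loop only reads i < la.length ≤ lb.length.
def pvForLoopA (la lb : List Char) (i : Nat) : Int :=
  if i < la.length then
    if la.getD i ' ' ≠ lb.getD i ' ' then
      ((la.getD i ' ').toNat : Int) - ((lb.getD i ' ').toNat : Int)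
    else pvForLoopA la lb (i + 1)
  else -1
termination_by la.length - i

def my_cmp (a : String) (b : String) : Int :=
  if (pvNorm b).length < (pvNorm a).length then - my_cmp b a
  else pvForLoopA (pvNorm a) (pvNorm b) 0
termination_by (if (pvNorm b).length < (pvNorm a).length then 1 else 0)
decreasing_by split <;> omega

-- ===== PORT B =====
-- 'for x, y in zip(na, nb): if x != y: return ord(x) - ord(y)' then the length tiebreak.
def pvScanB (tie : Int) : List Char → List Char → Int
  | x :: xs, y :: ys => if x ≠ y then ((x.toNat : Int) - (y.toNat : Int)) else pvScanB tie xs ys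
  | _, _ => tie

def my_cmp_alt (a : String) (b : String) : Int :=
  let na := pvNorm a
  let nb := pvNorm b
  pvScanB (if na.length ≤ nb.length then -1 else 1) na nb

-- ===== PRECONDITION & SPEC =====
def Spec_my_cmp (a : String) (b : String) (out : Int) : Prop := out = my_cmp_alt a b
instance (a : String) (b : String) (out : Int) : Decidable (Spec_my_cmp a b out) := by unfold Spec_my_cmp; infer_instance

-- ===== CLAIM (what is proved, stated in full; the proofs are below) =====
def Claim_equal_my_cmp : Prop := ∀ (a : String) (b : String), Dom_my_cmp a b → Spec_my_cmp a b (my_cmp a b)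

-- ===== LEMMAS AND PROOFS =====

-- A's index loop equals B's structural scan on the remaining suffixes.
lemma pvForLoopA_eq_scanB (la lb : List Char) (i : Nat) (h : la.length ≤ lb.length) :
    pvForLoopA la lb i = pvScanB (-1) (la.drop i) (lb.drop i) := by
  induction i using pvForLoopA.induct (la := la) (lb := lb) with
  | case1 i hlt hne =>
      rw [pvForLoopA]
      have hlb : i < lb.length := lt_of_lt_of_le hlt h
      rw [List.drop_eq_getElem_cons hlt, List.drop_eq_getElem_cons hlb, pvScanB]
      rw [List.getD_eq_getElem _ _ hlt, List.getD_eq_getElem _ _ hlb] at hne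
      simp [List.getD, List.getElem?_eq_getElem hlb, hlt, hne]
  | case2 i hlt hne ih =>
      rw [pvForLoopA]
      have hlb : i < lb.length := lt_of_lt_of_le hlt h
      rw [List.drop_eq_getElem_cons hlt, List.drop_eq_getElem_cons hlb, pvScanB]
      rw [List.getD_eq_getElem _ _ hlt, List.getD_eq_getElem _ _ hlb] at hne
      rw [not_ne_iff] at hne
      simp [List.getD, List.getElem?_eq_getElem hlb, hlt, hne, ih]
  | case3 i hge =>
      rw [pvForLoopA]
      have : la.drop i = [] := List.drop_eq_nil_of_le (by omega)
      simp [hge, this, pvScanB]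

-- Negating the scan with the arguments swapped flips the tiebreak when the first list is longer.
lemma pvScanB_swap (la lb : List Char) (h : lb.length < la.length) :
    - pvScanB (-1) lb la = pvScanB 1 la lb := by
  induction la generalizing lb with
  | nil => simp at h
  | cons x xs ih =>
      cases lb with
      | nil => simp [pvScanB]
      | cons y ys =>
          simp only [List.length_cons] at h
          rw [pvScanB, pvScanB]
          by_cases hxy : x = y
          · simp [hxy, ih ys (by omega)]
          · simp [hxy, Ne.symm hxy]

lemma my_cmp_unfold (a b : String) :
    my_cmp a b = if (pvNorm b).length < (pvNorm a).length then - my_cmp b a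
                 else pvForLoopA (pvNorm a) (pvNorm b) 0 := by
  rw [my_cmp.eq_def]

lemma my_cmp_alt_unfold (a b : String) :
    my_cmp_alt a b = pvScanB (if (pvNorm a).length ≤ (pvNorm b).length then -1 else 1)
      (pvNorm a) (pvNorm b) := rfl

-- ===== VERDICT (by name: the statement is the Claim_ definition above) =====
theorem my_cmp_spec : Claim_equal_my_cmp := by
  intro a b _
  unfold Spec_my_cmp
  rw [my_cmp_unfold, my_cmp_alt_unfold]
  by_cases h : (pvNorm b).length < (pvNorm a).length
  · rw [if_pos h, my_cmp_unfold, if_neg (by omega)]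
    rw [pvForLoopA_eq_scanB _ _ 0 (le_of_lt h)]
    simp only [List.drop_zero]
    rw [pvScanB_swap _ _ h, if_neg (by omega)]
  · rw [if_neg h, pvForLoopA_eq_scanB _ _ 0 (by omega)]
    simp only [List.drop_zero]
    rw [if_pos (by omega)]
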